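-- pv_equiv track=rewrite | github.com/fbuetler/adventofcode | 2023/11/solve.py | get_galaxies_in_expanded_space
-- ===== SOURCE A (Python) =====
-- def get_galaxies_in_expanded_space(grid, expansion_factor):
--     galaxies = list()
--     expand_x = 0
--     for i in range(len(grid)):
--         expand_x += expansion_factor if not any(grid[i]) else 1
--
--         expand_y = 0
--         for j in range(len(grid[i])):
--             expand_y += expansion_factor if not any([r[j] for r in grid]) else 1
--
--             if grid[i][j]:
--                 galaxies.append((expand_x, expand_y))
--
--     return galaxies
-- ===== SOURCE B (Python) =====
-- def get_galaxies_in_expanded_space(grid, expansion_factor):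
--     # Precompute the expanded y-coordinate of every column once (prefix sums),
--     # then collect galaxies in a single pass over the grid.
--     ncols = len(grid[0]) if grid else 0
--     ys = []
--     y = 0
--     for j in range(ncols):
--         y += 1 if any(row[j] for row in grid) else expansion_factor
--         ys.append(y)
--     galaxies = []
--     x = 0
--     for row in grid:
--         x += 1 if any(row) else expansion_factor
--         for j, v in enumerate(row):
--             if v:
--                 galaxies.append((x, ys[j]))
--     return galaxies
-- ===== Notes on version B (the rewrite author's own statement) =====
-- stated objective: faster
-- what changed: B precomputes each column's expanded y-coordinate once as a prefix-sum table and then collects galaxies in a single pass, instead of re-scanning the whole column for every cell as A does.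
import Mathlib
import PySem

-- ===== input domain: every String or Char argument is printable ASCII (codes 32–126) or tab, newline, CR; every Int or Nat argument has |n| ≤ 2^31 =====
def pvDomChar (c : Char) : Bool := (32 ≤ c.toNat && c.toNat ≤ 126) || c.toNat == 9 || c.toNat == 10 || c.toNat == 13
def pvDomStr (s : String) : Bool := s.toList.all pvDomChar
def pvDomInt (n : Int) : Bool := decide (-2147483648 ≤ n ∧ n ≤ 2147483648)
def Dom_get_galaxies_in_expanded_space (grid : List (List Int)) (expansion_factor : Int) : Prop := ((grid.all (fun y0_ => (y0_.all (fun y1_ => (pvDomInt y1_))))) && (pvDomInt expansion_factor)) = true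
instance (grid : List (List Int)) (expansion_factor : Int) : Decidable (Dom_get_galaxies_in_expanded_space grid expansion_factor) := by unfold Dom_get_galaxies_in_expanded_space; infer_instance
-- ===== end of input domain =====

-- B precomputes each column's expanded y-coordinate once (prefix sums) and then
-- collects galaxies in a single pass, instead of re-scanning every column per cell.

-- ===== PORT A =====
-- helper: body of A's outer loop for one row (grid[i]); literal transliteration
def pvRowStepA (grid : List (List Int)) (expansion_factor : Int)
    (st : List (Int × Int) × Int) (row : List Int) : List (Int × Int) × Int :=
  -- 'ex'/'ey' of the Python are written out in place (let-free; same values)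
  (((PySem.List.pyRange 0 (row.length : Int) 1).foldl
    (fun (st2 : List (Int × Int) × Int) j =>
      ((if PySem.List.pyGetD row j 0 ≠ 0 then
          st2.1 ++ [(st.2 + (if row.any (fun v => v ≠ 0) then 1 else expansion_factor),
                     st2.2 + (if (grid.map (fun r => PySem.List.pyGetD r j 0)).any (fun v => v ≠ 0) then 1 else expansion_factor))]
        else st2.1),
       st2.2 + (if (grid.map (fun r => PySem.List.pyGetD r j 0)).any (fun v => v ≠ 0) then 1 else expansion_factor)))
    (st.1, 0)).1,
   st.2 + (if row.any (fun v => v ≠ 0) then 1 else expansion_factor))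

def get_galaxies_in_expanded_space (grid : List (List Int)) (expansion_factor : Int) : List (Int × Int) :=
  ((PySem.List.pyRange 0 (grid.length : Int) 1).foldl
    (fun st i => pvRowStepA grid expansion_factor st (PySem.List.pyGetD grid i []))
    ([], 0)).1

-- ===== PORT B =====
-- helper: the ys table (expanded y-coordinate of every column, prefix sums)
def pvYsB (grid : List (List Int)) (expansion_factor : Int) : List Int :=
  ((PySem.List.pyRange 0 (((grid.headD []).length : Int)) 1).foldl   -- len(grid[0]) if grid else 0
    (fun (st : List Int × Int) j =>
      (st.1 ++ [st.2 + (if grid.any (fun row => PySem.List.pyGetD row j 0 ≠ 0) then 1 else expansion_factor)],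
       st.2 + (if grid.any (fun row => PySem.List.pyGetD row j 0 ≠ 0) then 1 else expansion_factor))) ([], 0)).1

-- helper: body of B's single pass for one row
def pvRowStepB (ys : List Int) (expansion_factor : Int)
    (st : List (Int × Int) × Int) (row : List Int) : List (Int × Int) × Int :=
  -- 'x' of the Python is written out in place (let-free; same value)
  ((PySem.List.enumerate row 0).foldl
    (fun gal jv => if jv.2 ≠ 0 then
        gal ++ [(st.2 + (if row.any (fun v => v ≠ 0) then 1 else expansion_factor), PySem.List.pyGetD ys jv.1 0)]
      else gal)
    st.1,
   st.2 + (if row.any (fun v => v ≠ 0) then 1 else expansion_factor))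

def get_galaxies_in_expanded_space_alt (grid : List (List Int)) (expansion_factor : Int) : List (Int × Int) :=
  (grid.foldl (pvRowStepB (pvYsB grid expansion_factor) expansion_factor) ([], 0)).1

-- ===== PRECONDITION & SPEC =====
-- A raises IndexError exactly when the grid is ragged (some row shorter than another):
-- Pre_ admits exactly the rectangular grids, on which A returns normally.
def Pre_get_galaxies_in_expanded_space (grid : List (List Int)) (expansion_factor : Int) : Prop :=
  ∀ row ∈ grid, row.length = (grid.headD []).length
instance (grid : List (List Int)) (expansion_factor : Int) : Decidable (Pre_get_galaxies_in_expanded_space grid expansion_factor) := by unfold Pre_get_galaxies_in_expanded_space; infer_instance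

def pvWitness_get_galaxies_in_expanded_space : List (List Int) × Int := ([[0, 1], [0, 0], [1, 0]], 3)

def Spec_get_galaxies_in_expanded_space (grid : List (List Int)) (expansion_factor : Int) (out : List (Int × Int)) : Prop := out = get_galaxies_in_expanded_space_alt grid expansion_factor
instance (grid : List (List Int)) (expansion_factor : Int) (out : List (Int × Int)) : Decidable (Spec_get_galaxies_in_expanded_space grid expansion_factor out) := by unfold Spec_get_galaxies_in_expanded_space; infer_instance

-- ===== CLAIM (what is proved, stated in full; the proofs are below) =====
def Claim_equal_get_galaxies_in_expanded_space : Prop := ∀ (grid : List (List Int)) (expansion_factor : Int), Dom_get_galaxies_in_expanded_space grid expansion_factor → Pre_get_galaxies_in_expanded_space grid expansion_factor → Spec_get_galaxies_in_expanded_space grid expansion_factor (get_galaxies_in_expanded_space grid expansion_factor)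

-- ===== LEMMAS AND PROOFS =====

-- The ys-table of port B is the table of prefix sums of the column weights.
theorem pv_ys_fold (w : Int → Int) (n : Nat) :
    ((PySem.List.pyRange 0 (n : Int) 1).foldl
      (fun (st : List Int × Int) j => (st.1 ++ [st.2 + w j], st.2 + w j)) ([], 0))
    = ((List.range n).map (fun k : Nat => ((PySem.List.pyRange 0 ((k : Int) + 1) 1).map w).sum),
       ((PySem.List.pyRange 0 (n : Int) 1).map w).sum) := by
  induction n with
  | zero => simp [PySem.List.pyRange_one_eq_nil]
  | succ m ih =>
    have hcast : ((m + 1 : Nat) : Int) = (m : Int) + 1 := by push_cast; ring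
    rw [hcast, PySem.List.pyRange_one_succ_right (by positivity), List.foldl_append, ih,
      List.range_succ]
    have hs : PySem.List.pyRange 0 ((m : Int) + 1) 1
        = PySem.List.pyRange 0 (m : Int) 1 ++ [(m : Int)] :=
      PySem.List.pyRange_one_succ_right (Int.natCast_nonneg m)
    simp [hs, List.map_append, List.sum_append]

-- Generic inner-loop equivalence: A's running-sum loop over indices equals
-- B's table-lookup loop, given that v gives the correct prefix sums.
theorem pv_inner (p : Int → Prop) [DecidablePred p] (u v : Int → Int) (ex : Int) :
    ∀ (n : Nat) (a ey : Int) (gal : List (Int × Int)),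
      (∀ j : Int, a ≤ j → j < a + n → v j = ey + ((PySem.List.pyRange a (j + 1) 1).map u).sum) →
      ((PySem.List.pyRange a (a + n) 1).foldl
        (fun (st2 : List (Int × Int) × Int) j =>
          ((if p j then st2.1 ++ [(ex, st2.2 + u j)] else st2.1), st2.2 + u j)) (gal, ey)).1
      = (PySem.List.pyRange a (a + n) 1).foldl
          (fun g j => if p j then g ++ [(ex, v j)] else g) gal := by
  intro n
  induction n with
  | zero => intro a ey gal _; simp [PySem.List.pyRange_one_eq_nil]
  | succ m ih =>
    intro a ey gal hv
    have hlt : a < a + (m + 1 : Nat) := by push_cast; omega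
    rw [PySem.List.pyRange_one_cons hlt]
    have hva : v a = ey + u a := by
      have := hv a le_rfl hlt
      rwa [PySem.List.pyRange_one_singleton, List.map_singleton, List.sum_singleton] at this
    have harith : a + ((m + 1 : Nat) : Int) = (a + 1) + (m : Nat) := by push_cast; ring
    simp only [List.foldl_cons, harith]
    rw [ih (a + 1) (ey + u a) _ ?_]
    · by_cases hp : p a <;> simp [hp, hva]
    · intro j hj1 hj2
      have hsplit : PySem.List.pyRange a (j + 1) 1
          = PySem.List.pyRange a (a + 1) 1 ++ PySem.List.pyRange (a + 1) (j + 1) 1 :=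
        PySem.List.pyRange_one_append a (a + 1) (j + 1) (by omega) (by omega)
      rw [hv j (by omega) (by push_cast; omega), hsplit, List.map_append, List.sum_append,
        PySem.List.pyRange_one_singleton, List.map_singleton, List.sum_singleton]
      ring

-- ===== VERDICT (by name: the statement is the Claim_ definition above) =====
theorem get_galaxies_in_expanded_space_spec : Claim_equal_get_galaxies_in_expanded_space := by
  intro grid f _ hpre
  unfold Spec_get_galaxies_in_expanded_space
  unfold get_galaxies_in_expanded_space get_galaxies_in_expanded_space_alt
  rw [PySem.List.foldl_pyRange_zero_pyGetD' grid [] (pvRowStepA grid f) ([], 0)]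
  congr 1
  apply PySem.List.foldl_congr_mem
  intro st row hrow
  have hlen : row.length = (grid.headD []).length := hpre row hrow
  -- the ys table is the table of prefix sums of the column weights
  have hys : pvYsB grid f
      = (List.range (grid.headD []).length).map
          (fun k : Nat => ((PySem.List.pyRange 0 ((k : Int) + 1) 1).map
            (fun j => if grid.any (fun row => PySem.List.pyGetD row j 0 ≠ 0) then (1 : Int) else f)).sum) :=
    congrArg Prod.fst (pv_ys_fold
      (fun j => if grid.any (fun row => PySem.List.pyGetD row j 0 ≠ 0) then 1 else f)
      (grid.headD []).length)
  have hv : ∀ j : Int, 0 ≤ j → j < 0 + (row.length : Int) →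
      PySem.List.pyGetD (pvYsB grid f) j 0
        = 0 + ((PySem.List.pyRange 0 (j + 1) 1).map
            (fun j => if (grid.map (fun r => PySem.List.pyGetD r j 0)).any (fun v => v ≠ 0) then 1 else f)).sum := by
    intro j h0 h1
    have hj : j.toNat < (grid.headD []).length := by omega
    have hjc : j = (j.toNat : Int) := by omega
    rw [hys, hjc, PySem.List.pyGetD_natCast,
      List.getD_eq_getElem _ _ (by simpa using hj)]
    simp only [List.getElem_map, List.getElem_range, zero_add]
    refine congrArg List.sum (List.map_congr_left ?_)
    intro x _
    simp [List.any_map, Function.comp]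
  have hinner := pv_inner (fun j => PySem.List.pyGetD row j 0 ≠ 0)
    (fun j => if (grid.map (fun r => PySem.List.pyGetD r j 0)).any (fun v => v ≠ 0) then 1 else f)
    (fun j => PySem.List.pyGetD (pvYsB grid f) j 0)
    (st.2 + (if row.any (fun v => v ≠ 0) then 1 else f))
    row.length 0 0 st.1 hv
  simp only [zero_add] at hinner
  unfold pvRowStepA pvRowStepB
  refine Prod.ext ?_ rfl
  refine Eq.trans hinner ?_
  rw [PySem.List.enumerate_eq_map_pyRange row (0 : Int), List.foldl_map]
  simp [PySem.List.len_eq]
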